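-- pv_equiv track=rewrite | github.com/syslog-ng/syslog-ng | contrib/config_option_database/utils/OptionParser.py | _parse_parents
-- ===== SOURCE A (Python) =====
-- def _parse_parents(path, option):
--     parents = []
--     skip = 0
--     for index, token in reversed(list(enumerate(path[:option[0]]))):
--         if token == "'('":
--             if skip:
--                 skip -= 1
--             else:
--                 parents.append(path[index - 1])
--         elif token == "')'":
--             skip += 1
--     return tuple(reversed(parents[:-1]))
-- ===== SOURCE B (Python) =====
-- def _parse_parents(path, option):
--     tokens = path[:option[0]]
--     n = len(tokens)
--
--     def scan(i, top):
--         # recursive-descent over tokens[i:]: a "'('" opens a nested region consumed by a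
--         # recursive call; a "')'" closes the current region (ignored at top level).
--         # Returns (parents of unmatched opens, next index, whether a ')' closed the region).
--         while i < n:
--             t = tokens[i]
--             if t == "'('":
--                 inner, j, closed = scan(i + 1, False)
--                 if not closed:
--                     return [path[i - 1]] + inner, j, False
--                 i = j
--             elif t == "')'" and not top:
--                 return [], i + 1, True
--             else:
--                 i += 1
--         return [], i, False
--
--     parents, _, _ = scan(0, True)
--     return tuple(parents[1:])
-- ===== Notes on version B (the rewrite author's own statement) =====
-- stated objective: alternative
-- what changed: Replaces A's reverse scan with a skip counter and final reversed(parents[:-1]) by a forward recursive descent: each "'('" opens a region consumed by a recursive call until its matching "')'" or the end, and unclosed opens contribute their preceding token directly in order.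
import Mathlib
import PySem

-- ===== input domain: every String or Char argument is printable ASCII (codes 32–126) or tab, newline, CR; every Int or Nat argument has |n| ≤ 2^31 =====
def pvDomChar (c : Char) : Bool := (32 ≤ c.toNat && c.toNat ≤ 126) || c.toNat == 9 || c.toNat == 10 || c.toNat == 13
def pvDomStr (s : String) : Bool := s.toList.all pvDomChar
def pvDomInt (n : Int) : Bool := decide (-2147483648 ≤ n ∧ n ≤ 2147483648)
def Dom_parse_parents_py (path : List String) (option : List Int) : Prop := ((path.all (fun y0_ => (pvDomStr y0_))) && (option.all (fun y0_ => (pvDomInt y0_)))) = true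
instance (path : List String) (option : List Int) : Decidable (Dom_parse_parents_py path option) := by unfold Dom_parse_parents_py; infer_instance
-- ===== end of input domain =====

-- B replaces A's reverse scan with a skip counter and a final reversed(parents[:-1])
-- by a recursive descent over the token prefix: a "'('" is consumed by a recursive
-- call that runs until its matching "')'" or the end; an open whose region is never
-- closed contributes its preceding token. Same return values; a different,
-- structurally recursive decomposition. Equivalence of the RETURN values is proved on
-- Pre_ (option nonempty); on option = [] the Python A raises IndexError.

-- ===== PORT A =====
-- loop body of A's `for` over reversed(list(enumerate(path[:option[0]]))); state = (parents, skip)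
def pyStepA (path : List String) (st : List String × Nat) (it : Int × String) : List String × Nat :=
  if it.2 == "'('" then
    if st.2 ≠ 0 then (st.1, st.2 - 1)
    else (st.1 ++ [(PySem.List.pyGet? path (it.1 - 1)).getD ""], st.2)
      -- path[index - 1]: always in range when the loop runs (path ≠ []), so getD's default is unreachable
  else if it.2 == "')'" then (st.1, st.2 + 1)
  else st

def parse_parents_py (path : List String) (option : List Int) : List String :=
  -- for … in reversed(list(enumerate(path[:option[0]]))); option[0]: Pre_ guarantees option ≠ []
  (((PySem.List.enumerate
      (PySem.List.slice path none (some ((PySem.List.pyGet? option 0).getD 0)))).reverse).foldl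
    (pyStepA path) ([], 0)).1.dropLast.reverse           -- tuple(reversed(parents[:-1]))

-- ===== PORT B =====
-- B's inner `def scan(i, top)`: the index loop becomes recursion on the remaining
-- token list (= tokens[i:]) with the running index i carried alongside; the fuel
-- argument only makes the loop-continuation call after a closed region structurally
-- total (fuel ≥ toks.length never runs out, see pyScan_spec below).
-- Returns (parents of unmatched opens, remaining tokens, next index, closed-by-')').
def pyScan (path : List String) : Nat → List String → Int → Bool →
    List String × List String × Int × Bool
  | 0, toks, i, _ => ([], toks, i, false)
  | _ + 1, [], i, _ => ([], [], i, false)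
  | fuel + 1, t :: rest, i, top =>
    if t == "'('" then
      let (inner, rem, j, closed) := pyScan path fuel rest (i + 1) false
      if closed then pyScan path fuel rem j top
      else ((PySem.List.pyGet? path (i - 1)).getD "" :: inner, rem, j, false)
    else if t == "')'" && top == false then ([], rest, i + 1, true)
    else pyScan path fuel rest (i + 1) top

def parse_parents_py_alt (path : List String) (option : List Int) : List String :=
  let tokens := PySem.List.slice path none (some ((PySem.List.pyGet? option 0).getD 0))
  (pyScan path (tokens.length + 1) tokens 0 true).1.drop 1     -- tuple(parents[1:])

-- ===== PRECONDITION & SPEC =====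
-- Pre_ excludes only option = [], on which the Python A raises IndexError at option[0].
def Pre_parse_parents_py (path : List String) (option : List Int) : Prop := option ≠ []
instance (path : List String) (option : List Int) : Decidable (Pre_parse_parents_py path option) := by unfold Pre_parse_parents_py; infer_instance
def pvWitness_parse_parents_py : List String × List Int := (["'('", "foo", "bar"], [3])

def Spec_parse_parents_py (path : List String) (option : List Int) (out : List String) : Prop := out = parse_parents_py_alt path option
instance (path : List String) (option : List Int) (out : List String) : Decidable (Spec_parse_parents_py path option out) := by unfold Spec_parse_parents_py; infer_instance

-- ===== CLAIM (what is proved, stated in full; the proofs are below) =====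
def Claim_equal_parse_parents_py : Prop := ∀ (path : List String) (option : List Int), Dom_parse_parents_py path option → Pre_parse_parents_py path option → Spec_parse_parents_py path option (parse_parents_py path option)

-- ===== LEMMAS AND PROOFS =====

-- proof-side forward fold: the guarded-pop stack together with a counter of unmatched ')'
def pvStepF (path : List String) (st : List String × Nat) (it : Int × String) : List String × Nat :=
  if it.2 == "'('" then (st.1 ++ [(PySem.List.pyGet? path (it.1 - 1)).getD ""], st.2)
  else if it.2 == "')'" then (if st.1 = [] then (st.1, st.2 + 1) else (st.1.dropLast, st.2))
  else st

-- stack component of pvStepF's forward fold, written as direct recursion with an index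
def pvG (path : List String) : List String → Int → List String → List String
  | [], _, s => s
  | t :: rest, i, s =>
    pvG path rest (i + 1)
      (if t == "'('" then s ++ [(PySem.List.pyGet? path (i - 1)).getD ""]
       else if t == "')'" then (if s = [] then s else s.dropLast) else s)

theorem pvG_eq_foldF (path : List String) (toks : List String) :
    ∀ (i : Int) (s : List String) (c : Nat),
      ((PySem.List.enumerate toks i).foldl (pvStepF path) (s, c)).1 = pvG path toks i s := by
  induction toks with
  | nil => intro i s c; simp [PySem.List.enumerate_nil, pvG]
  | cons t rest ih =>
    intro i s c
    rw [PySem.List.enumerate_cons, List.foldl_cons]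
    simp only [pvStepF, pvG]
    by_cases h1 : t == "'('"
    · simp only [h1, if_pos]; exact ih _ _ _
    · simp only [h1, Bool.false_eq_true, if_false]
      by_cases h2 : t == "')'"
      · simp only [h2, if_pos]
        by_cases hs : s = []
        · simp only [hs, if_pos]; exact ih _ _ _
        · simp only [hs, if_neg, if_false, ite_false]; exact ih _ _ _
      · simp only [h2, Bool.false_eq_true, if_false]; exact ih _ _ _

-- the main invariant of B's recursive descent, by induction on fuel:
-- a closed region cancels one pushed stack entry; an unclosed one appends its parents
-- to the stack; at top level the final stack IS the parents list.
theorem pyScan_spec (path : List String) :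
    ∀ (fuel : Nat) (toks : List String), toks.length ≤ fuel → ∀ (i : Int),
      (∀ p rem j c, pyScan path fuel toks i false = (p, rem, j, c) →
        ((∃ k : Nat, k ≤ toks.length ∧ rem = toks.drop k ∧ j = i + k) ∧
         (c = true → p = [] ∧ ∀ s a, pvG path toks i (s ++ [a]) = pvG path rem j s) ∧
         (c = false → rem = [] ∧ ∀ s a, pvG path toks i (s ++ [a]) = s ++ [a] ++ p))) ∧
      (∀ p rem j c, pyScan path fuel toks i true = (p, rem, j, c) →
        pvG path toks i [] = p) := by
  intro fuel
  induction fuel with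
  | zero =>
    intro toks hlen i
    have htoks : toks = [] := List.eq_nil_of_length_eq_zero (Nat.le_zero.mp hlen)
    subst htoks
    constructor
    · intro p rem j c h
      simp only [pyScan, Prod.mk.injEq] at h
      obtain ⟨hp, hrem, hj, hc⟩ := h
      subst hp; subst hrem; subst hj; subst hc
      refine ⟨⟨0, by simp⟩, by simp, fun _ => ⟨rfl, fun s a => by simp [pvG]⟩⟩
    · intro p rem j c h
      simp only [pyScan, Prod.mk.injEq] at h
      obtain ⟨hp, _, _, _⟩ := h
      subst hp; simp [pvG]
  | succ fuel ih =>
    intro toks hlen i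
    cases toks with
    | nil =>
      constructor
      · intro p rem j c h
        simp only [pyScan, Prod.mk.injEq] at h
        obtain ⟨hp, hrem, hj, hc⟩ := h
        subst hp; subst hrem; subst hj; subst hc
        refine ⟨⟨0, by simp⟩, by simp, fun _ => ⟨rfl, fun s a => by simp [pvG]⟩⟩
      · intro p rem j c h
        simp only [pyScan, Prod.mk.injEq] at h
        obtain ⟨hp, _, _, _⟩ := h
        subst hp; simp [pvG]
    | cons t rest =>
      have hrl : rest.length ≤ fuel := by simp at hlen; omega
      by_cases h1 : t == "'('"
      · -- t = "'('": a nested region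
        cases hrec : pyScan path fuel rest (i + 1) false with
        | mk inner q =>
          obtain ⟨rem1, j1, c1⟩ := q
          obtain ⟨⟨k1, hk1, hrem1, hj1⟩, hcl1, hucl1⟩ := (ih rest hrl (i + 1)).1 inner rem1 j1 c1 hrec
          have hGstep : ∀ x, pvG path (t :: rest) i x =
              pvG path rest (i + 1) (x ++ [(PySem.List.pyGet? path (i - 1)).getD ""]) := by
            intro x; simp [pvG, h1]
          cases c1 with
          | true =>
            obtain ⟨hinner, hGcl⟩ := hcl1 rfl
            have hlen1 : rem1.length ≤ fuel := by
              have := List.length_drop (l := rest) (i := k1)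
              rw [hrem1]; omega
            constructor
            · intro p rem j c h
              simp only [pyScan, h1, hrec, if_pos] at h
              obtain ⟨⟨k2, hk2, hrem2, hj2⟩, hcl2, hucl2⟩ := (ih rem1 hlen1 j1).1 p rem j c h
              refine ⟨⟨1 + k1 + k2, ?_, ?_, ?_⟩, ?_, ?_⟩
              · have := List.length_drop (l := rest) (i := k1)
                simp only [List.length_cons]
                rw [hrem1] at hk2
                rw [List.length_drop] at hk2
                omega
              · rw [hrem2, hrem1, List.drop_drop,
                  show (1 + k1 + k2 : Nat) = (k1 + k2) + 1 from by omega,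
                  List.drop_succ_cons]
              · rw [hj2, hj1]; push_cast; ring
              · intro hc
                obtain ⟨hp2, hG2⟩ := hcl2 hc
                refine ⟨hp2, fun s a => ?_⟩
                rw [hGstep, hGcl (s ++ [a]) _, hG2]
              · intro hc
                obtain ⟨hrem0, hG2⟩ := hucl2 hc
                refine ⟨hrem0, fun s a => ?_⟩
                rw [hGstep, hGcl (s ++ [a]) _, hG2]
            · intro p rem j c h
              simp only [pyScan, h1, hrec, if_pos] at h
              have hG2 := (ih rem1 hlen1 j1).2 p rem j c h
              rw [hGstep, show ([] : List String) ++ [(PySem.List.pyGet? path (i - 1)).getD ""] = [] ++ [(PySem.List.pyGet? path (i - 1)).getD ""] from rfl, hGcl [] _, hG2]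
          | false =>
            obtain ⟨hrem0, hGu⟩ := hucl1 rfl
            constructor
            · intro p rem j c h
              simp only [pyScan, h1, hrec, if_true, Bool.false_eq_true, if_false, Prod.mk.injEq] at h
              obtain ⟨hp, hrem, hj, hc⟩ := h
              subst hp; subst hrem; subst hj; subst hc
              have hk1' : k1 = rest.length := by
                rw [hrem1] at hrem0
                have h0 := congrArg List.length hrem0
                rw [List.length_drop] at h0
                simp at h0
                omega
              refine ⟨⟨1 + k1, ?_, ?_, ?_⟩, by simp, fun _ => ⟨hrem0, fun s a => ?_⟩⟩
              · simp; omega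
              · rw [hrem1, show (1 + k1 : Nat) = k1 + 1 from by omega, List.drop_succ_cons]
              · rw [hj1]; push_cast; ring
              · rw [hGstep, hGu (s ++ [a]) _]
                simp
            · intro p rem j c h
              simp only [pyScan, h1, hrec, if_true, Bool.false_eq_true, if_false, Prod.mk.injEq] at h
              obtain ⟨hp, _, _, _⟩ := h
              subst hp
              rw [hGstep, show ([] : List String) ++ [(PySem.List.pyGet? path (i - 1)).getD ""] = [] ++ [(PySem.List.pyGet? path (i - 1)).getD ""] from rfl, hGu [] _]
              simp
      · by_cases h2 : t == "')'"
        · -- t = "')'"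
          constructor
          · intro p rem j c h
            simp [pyScan, h1, h2, Prod.mk.injEq] at h
            obtain ⟨hp, hrem, hj, hc⟩ := h
            subst hp; subst hrem; subst hj; subst hc
            refine ⟨⟨1, by simp, by simp, by ring⟩, fun _ => ⟨rfl, fun s a => ?_⟩, by simp⟩
            simp [pvG, h1, h2]
          · intro p rem j c h
            simp only [pyScan, h1, h2, Bool.false_eq_true, if_false, Bool.and_false] at h
            have hG2 := (ih rest hrl (i + 1)).2 p rem j c h
            simpa [pvG, h1, h2] using hG2
        · -- ordinary token
          have hGstep : ∀ x, pvG path (t :: rest) i x = pvG path rest (i + 1) x := by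
            intro x; simp [pvG, h1, h2]
          constructor
          · intro p rem j c h
            simp only [pyScan, h1, h2, Bool.false_eq_true, if_false, Bool.false_and] at h
            obtain ⟨⟨k1, hk1, hrem1, hj1⟩, hcl1, hucl1⟩ := (ih rest hrl (i + 1)).1 p rem j c h
            refine ⟨⟨k1 + 1, by simp; omega, by simpa using hrem1, by rw [hj1]; push_cast; ring⟩, ?_, ?_⟩
            · intro hc
              obtain ⟨hp2, hG2⟩ := hcl1 hc
              exact ⟨hp2, fun s a => by rw [hGstep, hG2]⟩
            · intro hc
              obtain ⟨hrem0, hG2⟩ := hucl1 hc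
              exact ⟨hrem0, fun s a => by rw [hGstep, hG2]⟩
          · intro p rem j c h
            simp only [pyScan, h1, h2, Bool.false_eq_true, if_false, Bool.false_and] at h
            have hG2 := (ih rest hrl (i + 1)).2 p rem j c h
            rw [hGstep, hG2]

-- tuple(reversed(xs))[:-1]-style identity: reverse, dropLast, reverse = drop 1
theorem pv_rev_dropLast_rev (l : List String) : l.reverse.dropLast.reverse = l.drop 1 := by
  cases l with
  | nil => rfl
  | cons a t => simp [List.reverse_cons]

-- A's backward fold from state (p, k) in terms of the forward fold (S, c) := pvStepF-fold of l:
-- the k pending closers cancel the k innermost unmatched opens of l, the rest is appended to p.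
theorem pvA_backward (path : List String) (l : List (Int × String)) :
    ∀ p k, (l.reverse.foldl (pyStepA path) (p, k)) =
      (p ++ (((l.foldl (pvStepF path) ([], 0)).1).take ((l.foldl (pvStepF path) ([], 0)).1.length - k)).reverse,
       (l.foldl (pvStepF path) ([], 0)).2 + (k - min k (l.foldl (pvStepF path) ([], 0)).1.length)) := by
  induction l using List.reverseRecOn with
  | nil => intro p k; simp
  | append_singleton t x ih =>
    intro p k
    rw [List.reverse_append, List.reverse_singleton, List.singleton_append, List.foldl_cons]
    simp only [List.foldl_append, List.foldl_cons, List.foldl_nil]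
    cases hF : t.foldl (pvStepF path) ([], 0) with
    | mk s' c' =>
      simp only [pyStepA, pvStepF, beq_iff_eq]
      by_cases h1 : x.2 = "'('"
      · simp only [h1, if_pos, if_true]
        by_cases hk : k = 0
        · subst hk
          simp only [ne_eq, not_true_eq_false, if_false, ite_false, not_false_eq_true]
          rw [ih, hF]
          refine Prod.ext ?_ ?_
          · simp only [Nat.sub_zero, List.take_length]
            simp [List.reverse_append]
          · simp
        · simp only [ne_eq, hk, not_false_eq_true, if_true, ite_true]
          rw [ih, hF]
          refine Prod.ext ?_ ?_
          · have ht : (s' ++ [(PySem.List.pyGet? path (x.1 - 1)).getD ""]).take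
                ((s' ++ [(PySem.List.pyGet? path (x.1 - 1)).getD ""]).length - k) = s'.take (s'.length - (k - 1)) := by
              rw [List.length_append]
              rw [List.take_append_of_le_length (l₂ := [(PySem.List.pyGet? path (x.1 - 1)).getD ""])
                (by simp; omega)]
              congr 1
              simp
              omega
            simp only [ht]
          · simp only [List.length_append, List.length_cons, List.length_nil]
            omega
      · simp only [h1, if_false, ite_false]
        by_cases h2 : x.2 = "')'"
        · simp only [h2, if_pos, if_true]
          rw [ih, hF]
          rcases s' with _ | ⟨a, s'⟩
          · simp only [if_pos, List.length_nil]
            refine Prod.ext ?_ ?_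
            · simp
            · simp; omega
          · simp only [reduceCtorEq, if_false, ite_false]
            refine Prod.ext ?_ ?_
            · have ht : (a :: s').dropLast.take ((a :: s').dropLast.length - k)
                  = (a :: s').take ((a :: s').length - (k + 1)) := by
                rw [List.dropLast_eq_take, List.take_take, List.length_take]
                congr 1
                simp only [List.length_cons]
                omega
              simp only [ht]
            · simp only [List.length_dropLast, List.length_cons]
              omega
        · simp only [h2, if_false, ite_false]
          rw [ih, hF]

-- ===== VERDICT (by name: the statement is the Claim_ definition above) =====
theorem parse_parents_py_spec : Claim_equal_parse_parents_py := by
  intro path option _ _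
  unfold Spec_parse_parents_py parse_parents_py parse_parents_py_alt
  set toks := PySem.List.slice path none (some ((PySem.List.pyGet? option 0).getD 0)) with htoks
  rw [pvA_backward path (PySem.List.enumerate toks 0) [] 0]
  simp only [List.nil_append, Nat.sub_zero, List.take_length]
  rw [pv_rev_dropLast_rev]
  cases hS : pyScan path (toks.length + 1) toks 0 true with
  | mk p q =>
    obtain ⟨rem, j, c⟩ := q
    have h := (pyScan_spec path (toks.length + 1) toks (by omega) 0).2 p rem j c hS
    rw [← pvG_eq_foldF path toks 0 [] 0] at h
    simp [hS, h]
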